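-- pv_equiv track=rewrite | github.com/LordMartron94/Book-Indexer | Src/KeyBertPipeline/preprocess.py | _remove_new_lines
-- ===== SOURCE A (Python) =====
-- def _remove_new_lines(body: list[str]):
--     removed: list[str] = []
--
--     for body_part in body:
--         new = ""
--         for i in range(len(body_part)):
--             if body_part[i] == "\n" and i > 0 and body_part[i-1] == "-":
--                 new += ""
--             elif body_part[i] == "\n":
--                 new += " "
--             else:
--                 new += body_part[i]
--         removed.append(new)
--
--     return removed
-- ===== SOURCE B (Python) =====
-- def _join_part(body_part):
--     parts = body_part.split("\n")
--     new = parts[0]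
--     prev = parts[0]
--     for part in parts[1:]:
--         new += ("" if prev.endswith("-") else " ") + part
--         prev = part
--     return new
--
--
-- def _remove_new_lines(body: list[str]):
--     return [_join_part(body_part) for body_part in body]
-- ===== Notes on version B (the rewrite author's own statement) =====
-- stated objective: alternative
-- what changed: B splits each string on '\n' once and folds the segments back together, choosing the joiner ('' after a segment ending in '-', ' ' otherwise) per boundary, instead of A's character-by-character index loop with one-char lookback.
import Mathlib
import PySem

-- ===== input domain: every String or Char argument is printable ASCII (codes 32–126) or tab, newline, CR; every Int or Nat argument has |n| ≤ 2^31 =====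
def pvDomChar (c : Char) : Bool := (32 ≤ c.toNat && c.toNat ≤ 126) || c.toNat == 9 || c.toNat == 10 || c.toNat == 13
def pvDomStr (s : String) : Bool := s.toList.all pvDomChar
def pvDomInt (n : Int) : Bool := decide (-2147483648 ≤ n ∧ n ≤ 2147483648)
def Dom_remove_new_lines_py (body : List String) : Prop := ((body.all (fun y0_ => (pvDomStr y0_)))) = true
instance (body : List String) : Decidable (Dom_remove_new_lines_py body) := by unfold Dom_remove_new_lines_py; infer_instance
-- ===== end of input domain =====

-- B re-implements _remove_new_lines by splitting each string on '\n' and folding the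
-- segments back with a per-boundary joiner, instead of A's per-character index loop
-- with one-char lookback; same return value, no speed claim (objective: alternative).


-- ===== PORT A =====
-- inner loop of A: for i in range(len(body_part)) with one-char lookback
def pvALine (l : List Char) : List Char :=
  (PySem.List.pyRange 0 (PySem.Chars.len l) 1).foldl
    (fun new i =>
      if PySem.List.pyGet? l i = some '\n' ∧ i > 0 ∧ PySem.List.pyGet? l (i - 1) = some '-' then
        new ++ []
      else if PySem.List.pyGet? l i = some '\n' then
        new ++ [' ']
      else
        new ++ (PySem.List.pyGet? l i).elim [] (fun c => [c]))
    []

def remove_new_lines_py (body : List String) : List String :=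
  body.foldl (fun removed body_part => removed ++ [String.ofList (pvALine body_part.toList)]) []

-- ===== PORT B =====
-- B's inner loop: new += ("" if prev.endswith("-") else " ") + part; prev = part
def pvBJoin : List Char → List Char → List (List Char) → List Char
  | new, _, [] => new
  | new, prev, part :: rest =>
      pvBJoin (new ++ ((if PySem.Chars.endswith prev ['-'] then [] else [' ']) ++ part)) part rest

-- _join_part: split on "\n", then fold the parts back together
def pvBLine (l : List Char) : List Char :=
  match l.splitOn '\n' with
  | [] => []          -- unreachable: splitOn never returns []
  | p :: rest => pvBJoin p p rest

def remove_new_lines_py_alt (body : List String) : List String :=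
  body.map (fun body_part => String.ofList (pvBLine body_part.toList))

-- ===== PRECONDITION & SPEC =====
def Spec_remove_new_lines_py (body : List String) (out : List String) : Prop := out = remove_new_lines_py_alt body
instance (body : List String) (out : List String) : Decidable (Spec_remove_new_lines_py body out) := by unfold Spec_remove_new_lines_py; infer_instance

-- ===== CLAIM (what is proved, stated in full; the proofs are below) =====
def Claim_equal_remove_new_lines_py : Prop := ∀ (body : List String), Dom_remove_new_lines_py body → Spec_remove_new_lines_py body (remove_new_lines_py body)

-- ===== LEMMAS AND PROOFS =====

-- canonical one-pass scanner both ports are reduced to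
def pvScan (prev : Option Char) : List Char → List Char
  | [] => []
  | c :: cs => (if c = '\n' then (if prev = some '-' then [] else [' ']) else [c]) ++ pvScan (some c) cs

-- what pvBJoin appends after its accumulator
def pvGlue : List Char → List (List Char) → List Char
  | _, [] => []
  | prev, part :: rest =>
      (if PySem.Chars.endswith prev ['-'] then [] else [' ']) ++ part ++ pvGlue part rest

theorem pvBJoin_eq_glue (rest : List (List Char)) : ∀ (new prev : List Char),
    pvBJoin new prev rest = new ++ pvGlue prev rest := by
  induction rest with
  | nil => intro new prev; simp [pvBJoin, pvGlue]
  | cons q t ih => intro new prev; simp [pvBJoin, pvGlue, ih]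

theorem pvEndswithDash (cur : List Char) :
    PySem.Chars.endswith cur ['-'] = true ↔ cur.getLast? = some '-' := by
  rw [PySem.Chars.endswith_iff]
  constructor
  · rintro ⟨t, rfl⟩; simp
  · intro h
    rcases List.getLast?_eq_some_iff.mp h with ⟨l', rfl⟩
    exact ⟨l', rfl⟩

theorem pvScan_congr (l : List Char) (p q : Option Char)
    (h : (p = some '-') ↔ (q = some '-')) : pvScan p l = pvScan q l := by
  by_cases hp : p = some '-'
  · have hq := h.mp hp
    cases l <;> simp [pvScan, hp, hq]
  · have hq : ¬ q = some '-' := fun hh => hp (h.mpr hh)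
    cases l <;> simp [pvScan, hp, hq]

theorem pvPrevCond (pre : List Char) (c : Char) (cs : List Char) :
    (((pre.length : Int) > 0) ∧
        PySem.List.pyGet? (pre ++ c :: cs) ((pre.length : Int) - 1) = some '-')
      ↔ pre.getLast? = some '-' := by
  rcases List.eq_nil_or_concat pre with rfl | ⟨p', x, rfl⟩
  · simp
  · simp only [List.concat_eq_append]
    have h1 : (((p' ++ [x]).length : Int)) - 1 = (p'.length : Int) := by
      have hx : (p' ++ [x]).length = p'.length + 1 := by simp
      rw [hx]; push_cast; omega
    rw [h1, List.append_assoc, List.singleton_append]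
    rw [PySem.List.pyGet?_append_length p' (c :: cs) x]
    have hpos : (0 : Int) < ((p' ++ [x]).length : Int) := by
      exact_mod_cast Nat.pos_of_ne_zero (by simp)
    constructor
    · rintro ⟨-, hx⟩; simp; simpa using hx
    · intro hx
      refine ⟨hpos, ?_⟩
      simp at hx
      simp [hx]

theorem pvALoop (l : List Char) (suf : List Char) : ∀ (pre acc : List Char), l = pre ++ suf →
    (PySem.List.pyRange (pre.length : Int) (l.length : Int) 1).foldl
      (fun new i =>
        if PySem.List.pyGet? l i = some '\n' ∧ i > 0 ∧ PySem.List.pyGet? l (i - 1) = some '-' then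
          new ++ []
        else if PySem.List.pyGet? l i = some '\n' then
          new ++ [' ']
        else
          new ++ (PySem.List.pyGet? l i).elim [] (fun c => [c])) acc
    = acc ++ pvScan pre.getLast? suf := by
  induction suf with
  | nil =>
    intro pre acc h
    have hle : (l.length : Int) ≤ (pre.length : Int) := by
      subst h; simp
    rw [PySem.List.pyRange_one_eq_nil hle]
    simp [pvScan]
  | cons c cs ih =>
    intro pre acc h
    have hlt : (pre.length : Int) < (l.length : Int) := by
      subst h
      have hx : pre.length < (pre ++ c :: cs).length := by
        rw [List.length_append, List.length_cons]; omega
      exact_mod_cast hx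
    rw [PySem.List.pyRange_one_cons hlt]
    simp only [List.foldl_cons]
    have hg : PySem.List.pyGet? l (pre.length : Int) = some c := by
      rw [h]; exact PySem.List.pyGet?_append_length pre cs c
    have hcond : (((pre.length : Int) > 0) ∧
        PySem.List.pyGet? l ((pre.length : Int) - 1) = some '-') ↔ pre.getLast? = some '-' := by
      rw [h]; exact pvPrevCond pre c cs
    have hlen : (pre.length : Int) + 1 = (((pre ++ [c]).length : Int)) := by
      have hx : (pre ++ [c]).length = pre.length + 1 := by simp
      rw [hx]; push_cast; omega
    have hglast : (pre ++ [c]).getLast? = some c := List.getLast?_concat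
    have happ : l = (pre ++ [c]) ++ cs := by rw [h]; simp
    by_cases hc : c = '\n'
    · by_cases hd : pre.getLast? = some '-'
      · rw [if_pos ⟨by rw [hg, hc], hcond.mpr hd⟩]
        rw [hlen, ih (pre ++ [c]) (acc ++ []) happ, hglast]
        simp [pvScan, hc, hd]
      · have hnot : ¬ (PySem.List.pyGet? l (pre.length : Int) = some '\n' ∧
            ((pre.length : Int) > 0) ∧
            PySem.List.pyGet? l ((pre.length : Int) - 1) = some '-') := by
          rintro ⟨-, h2⟩; exact hd (hcond.mp h2)
        rw [if_neg hnot, if_pos (by rw [hg, hc])]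
        rw [hlen, ih (pre ++ [c]) (acc ++ [' ']) happ, hglast]
        simp [pvScan, hc, hd]
    · have hne : ¬ PySem.List.pyGet? l (pre.length : Int) = some '\n' := by
        rw [hg]; simpa using hc
      rw [if_neg (fun hh => hne hh.1), if_neg hne, hg]
      rw [hlen, ih (pre ++ [c]) _ happ, hglast]
      simp [pvScan, hc]

theorem pvALine_eq_scan (l : List Char) : pvALine l = pvScan none l := by
  have h := pvALoop l l [] [] rfl
  simpa [pvALine] using h

theorem pvSplitOn_ne_nil (l : List Char) : l.splitOn '\n' ≠ [] := by
  induction l with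
  | nil => simp [List.splitOn, List.splitOnP_nil]
  | cons c cs ih =>
    rw [List.splitOn, List.splitOnP_cons]
    split
    · simp
    · rw [List.splitOn] at ih
      rcases h : cs.splitOnP (· == '\n') with _ | ⟨a, b⟩
      · exact absurd h ih
      · simp [List.modifyHead]

theorem pvBScan (l : List Char) : ∀ (cur : List Char),
    pvScan cur.getLast? l
      = ((l.splitOn '\n').headD []) ++
        pvGlue (cur ++ (l.splitOn '\n').headD []) (l.splitOn '\n').tail := by
  induction l with
  | nil =>
    intro cur
    simp [pvScan, pvGlue, List.splitOn, List.splitOnP_nil]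
  | cons c cs ih =>
    intro cur
    rcases hne : cs.splitOn '\n' with _ | ⟨h', t'⟩
    · exact absurd hne (pvSplitOn_ne_nil cs)
    · by_cases hc : c = '\n'
      · subst hc
        have hsplit : ('\n' :: cs).splitOn '\n' = [] :: cs.splitOn '\n' := by
          simp [List.splitOn, List.splitOnP_cons]
        rw [hsplit, hne]
        simp only [List.headD, List.tail, List.nil_append, List.append_nil]
        have hih := ih []
        rw [hne] at hih
        simp only [List.headD, List.tail, List.nil_append, List.getLast?_nil] at hih
        have hcs : pvScan (some '\n') cs = h' ++ pvGlue h' t' := by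
          rw [pvScan_congr cs (some '\n') none (by simp)]; exact hih
        by_cases hd : cur.getLast? = some '-'
        · have hew : PySem.Chars.endswith cur ['-'] = true := (pvEndswithDash cur).mpr hd
          simp [pvScan, pvGlue, hd, hew, hcs]
        · have hew : ¬ PySem.Chars.endswith cur ['-'] = true :=
            fun hh => hd ((pvEndswithDash cur).mp hh)
          simp [pvScan, pvGlue, hd, hew, hcs]
      · have hsplit : (c :: cs).splitOn '\n' = (c :: h') :: t' := by
          rw [List.splitOn, List.splitOnP_cons]
          rw [if_neg (by simpa using hc)]
          rw [List.splitOn] at hne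
          simp [hne, List.modifyHead]
        rw [hsplit]
        simp only [List.headD, List.tail]
        have hcong : pvScan (some c) cs = pvScan ((cur ++ [c]).getLast?) cs := by
          rw [List.getLast?_concat]
        have hih := ih (cur ++ [c])
        rw [hne] at hih
        simp only [List.headD, List.tail, List.append_assoc, List.singleton_append] at hih
        simp [pvScan, hc, hcong]
        exact hih

theorem pvBLine_eq_scan (l : List Char) : pvBLine l = pvScan none l := by
  rcases hs : l.splitOn '\n' with _ | ⟨p, rest⟩
  · exact absurd hs (pvSplitOn_ne_nil l)
  · have h := pvBScan l []
    rw [hs] at h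
    simp only [List.headD, List.tail, List.nil_append, List.getLast?_nil] at h
    unfold pvBLine
    rw [hs]
    show pvBJoin p p rest = pvScan none l
    rw [pvBJoin_eq_glue, h]

-- ===== VERDICT (by name: the statement is the Claim_ definition above) =====
theorem remove_new_lines_py_spec : Claim_equal_remove_new_lines_py := by
  intro body _
  show remove_new_lines_py body = remove_new_lines_py_alt body
  unfold remove_new_lines_py remove_new_lines_py_alt
  rw [PySem.List.foldl_append_singleton_eq_map]
  simp [pvALine_eq_scan, pvBLine_eq_scan]
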